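-- pv_equiv track=rewrite | github.com/Dmireles1010/NLP-Film-Script-Analysis-with-Word-Clouds | wordcloud.py | generateNewSizes
-- ===== SOURCE A (Python) =====
-- def createRangeList(countList,spreadAmount):
--     newSet=[]
--     maxNum = max(countList)
--     for num in countList:
--         if(num in range(maxNum-spreadAmount,maxNum)):
--             continue
--         else:
--             if(num not in newSet):
--                 newSet.append(num)
--             maxNum = num
--
--     return newSet
--
-- def generateNewSizes(tupleList,sizes,individualChar=False):
--     tupleList = sorted(tupleList, key=lambda x: x[1], reverse=True)
--
--     countList = [i[1] for i in tupleList]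
--     if(individualChar):
--         rangeList = createRangeList(countList,0)
--     else:
--         rangeList = createRangeList(countList,6)
--
--
--     if(len(rangeList)>len(sizes)):
--         rangeList=rangeList[0:len(sizes)-1]
--     newSizeList = []
--     newTupleList = []
--     for count in countList:
--         added = False
--         for index in range(0,len(rangeList)-1):
--             if(count in range(rangeList[index+1],rangeList[index]+1)):
--                 added = True
--                 newSizeList.append(sizes[index])
--                 break
--         #hard coding this case. if all number counts are the same, set to default size of sizes[1].
--         if(len(rangeList)==1):
--             newSizeList.append(sizes[1])
--             continue
--         #last case for iteratin of loop
--         if(not added):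
--             newSizeList.append(sizes[len(sizes)-1])
--
--     for count in range(0,len(newSizeList)):
--         newTupleList.append( (tupleList[count][1],newSizeList[count] ) )
--
--     return newTupleList
-- ===== SOURCE B (Python) =====
-- def generateNewSizes(tupleList, sizes, individualChar=False):
--     spread = 0 if individualChar else 6
--     ordered = sorted(tupleList, key=lambda x: x[1], reverse=True)
--     counts = [t[1] for t in ordered]
--     # one pass over the descending counts: a new anchor opens whenever the
--     # count drops by more than `spread` below the current anchor
--     anchors = [counts[0]]
--     cur = counts[0]
--     for c in counts[1:]:
--         if c < cur - spread:
--             anchors.append(c)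
--             cur = c
--     if len(anchors) > len(sizes):
--         anchors = anchors[0:len(sizes) - 1]
--     if len(anchors) == 1:
--         return [(c, sizes[1]) for c in counts]
--     tail = anchors[1:]
--     last = len(anchors) - 2
--
--     def pick(c):
--         # rank of c's bucket = number of anchor boundaries strictly above c
--         k = sum(1 for a in tail if a > c)
--         return sizes[k] if k <= last else sizes[len(sizes) - 1]
--
--     return [(c, pick(c)) for c in counts]
-- ===== Notes on version B (the rewrite author's own statement) =====
-- stated objective: alternative
-- what changed: Replaces createRangeList's membership/range-object scan with a one-pass gap detector over the sorted counts, and replaces the inner first-matching-interval scan with a closed-form bucket rank (count of anchor boundaries strictly above the count) compared against the truncated table length.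
import Mathlib
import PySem

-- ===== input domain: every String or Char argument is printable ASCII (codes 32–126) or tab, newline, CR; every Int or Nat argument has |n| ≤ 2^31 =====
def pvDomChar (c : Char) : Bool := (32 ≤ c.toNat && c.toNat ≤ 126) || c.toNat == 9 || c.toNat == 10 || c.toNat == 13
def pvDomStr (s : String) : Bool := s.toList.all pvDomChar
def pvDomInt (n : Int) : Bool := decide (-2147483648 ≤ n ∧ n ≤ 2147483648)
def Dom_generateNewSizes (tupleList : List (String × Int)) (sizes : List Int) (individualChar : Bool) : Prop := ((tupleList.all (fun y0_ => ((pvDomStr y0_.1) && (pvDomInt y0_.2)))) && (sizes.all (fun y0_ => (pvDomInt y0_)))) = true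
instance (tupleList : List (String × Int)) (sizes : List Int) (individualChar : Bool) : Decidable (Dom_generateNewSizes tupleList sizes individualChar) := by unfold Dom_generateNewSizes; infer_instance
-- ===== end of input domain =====

-- Port A vs port B of generateNewSizes: B replaces createRangeList's membership/range scan by a
-- one-pass gap detector and the inner first-matching-interval scan by a closed-form bucket rank;
-- equal on all inputs where the Python A returns (Pre_ = no exception).


-- ===== PORT A =====
-- createRangeList; max() raises ValueError on an empty list — excluded by Pre_, the .getD 0 is never used there
def pvCreateRangeList (countList : List Int) (spreadAmount : Int) : List Int :=
  (countList.foldl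
    (fun (st : List Int × Int) num =>
      if st.2 - spreadAmount ≤ num ∧ num < st.2 then st
      else ((if num ∈ st.1 then st.1 else st.1 ++ [num]), num))
    ([], (PySem.List.max? countList (fun x => x)).getD 0)).1

-- the inner 'for index in range(0, len(rangeList)-1): if count in range(...): break' loop,
-- returning the first index whose interval contains count
def pvScanBuckets : List Int → Int → Option Nat
  | a :: b :: rs, c => if b ≤ c ∧ c ≤ a then some 0 else (pvScanBuckets (b :: rs) c).map (· + 1)
  | _, _ => none

def generateNewSizes (tupleList : List (String × Int)) (sizes : List Int) (individualChar : Bool) : List (Int × Int) :=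
  let tl := PySem.List.sorted tupleList (fun x => x.2) true
  let countList := tl.map (fun i => i.2)
  let rangeList := if individualChar then pvCreateRangeList countList 0 else pvCreateRangeList countList 6
  let rangeList := if (rangeList.length : Int) > (sizes.length : Int)
      then PySem.List.slice rangeList (some 0) (some ((sizes.length : Int) - 1)) else rangeList
  let newSizeList := countList.foldl
    (fun acc count =>
      let added := pvScanBuckets rangeList count
      let acc := match added with
        | some index => acc ++ [PySem.List.pyGetD sizes (index : Int) 0]   -- sizes[index]; in range under Pre_
        | none => acc
      if rangeList.length = 1 then acc ++ [PySem.List.pyGetD sizes 1 0]    -- sizes[1]; in range under Pre_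
      else match added with
        | some _ => acc
        | none => acc ++ [PySem.List.pyGetD sizes ((sizes.length : Int) - 1) 0]) []
  (List.range newSizeList.length).foldl
    (fun acc (count : Nat) =>
      acc ++ [((PySem.List.pyGetD tl (count : Int) ("", 0)).2, PySem.List.pyGetD newSizeList (count : Int) 0)]) []

-- ===== PORT B =====
def generateNewSizes_alt (tupleList : List (String × Int)) (sizes : List Int) (individualChar : Bool) : List (Int × Int) :=
  let spread : Int := if individualChar then 0 else 6
  let ordered := PySem.List.sorted tupleList (fun x => x.2) true
  let counts := ordered.map (fun t => t.2)
  let c0 := PySem.List.pyGetD counts 0 0          -- counts[0]; IndexError on empty input, excluded by Pre_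
  let anchors := ((PySem.List.slice counts (some 1) none).foldl
      (fun (st : List Int × Int) c => if c < st.2 - spread then (st.1 ++ [c], c) else st) ([c0], c0)).1
  let anchors := if (anchors.length : Int) > (sizes.length : Int)
      then PySem.List.slice anchors (some 0) (some ((sizes.length : Int) - 1)) else anchors
  if anchors.length = 1 then counts.map (fun c => (c, PySem.List.pyGetD sizes 1 0))
  else
    let tail := PySem.List.slice anchors (some 1) none
    let last : Int := (anchors.length : Int) - 2
    counts.map (fun c =>
      let k := (tail.filter (fun a => decide (c < a))).length
      (c, if (k : Int) ≤ last then PySem.List.pyGetD sizes (k : Int) 0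
          else PySem.List.pyGetD sizes ((sizes.length : Int) - 1) 0))

-- ===== PRECONDITION & SPEC =====
-- Pre_ = exactly the inputs on which the Python A returns: A raises on an empty tupleList
-- (max() of an empty list), on empty sizes (sizes[-1]), and on sizes of length 1 when all counts
-- lie within the spread of the maximum (the hard-coded sizes[1] case).
def Pre_generateNewSizes (tupleList : List (String × Int)) (sizes : List Int) (individualChar : Bool) : Prop :=
  tupleList ≠ [] ∧ sizes ≠ [] ∧
    (2 ≤ sizes.length ∨
      ∃ a ∈ tupleList, ∃ b ∈ tupleList, b.2 < a.2 - (if individualChar then 0 else 6))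
instance (tupleList : List (String × Int)) (sizes : List Int) (individualChar : Bool) : Decidable (Pre_generateNewSizes tupleList sizes individualChar) := by unfold Pre_generateNewSizes; infer_instance

def pvWitness_generateNewSizes : (List (String × Int)) × List Int × Bool := ([("a", 3), ("b", 1)], [10, 20], false)

def Spec_generateNewSizes (tupleList : List (String × Int)) (sizes : List Int) (individualChar : Bool) (out : List (Int × Int)) : Prop := out = generateNewSizes_alt tupleList sizes individualChar
instance (tupleList : List (String × Int)) (sizes : List Int) (individualChar : Bool) (out : List (Int × Int)) : Decidable (Spec_generateNewSizes tupleList sizes individualChar out) := by unfold Spec_generateNewSizes; infer_instance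

-- ===== CLAIM (what is proved, stated in full; the proofs are below) =====
def Claim_equal_generateNewSizes : Prop := ∀ (tupleList : List (String × Int)) (sizes : List Int) (individualChar : Bool), Dom_generateNewSizes tupleList sizes individualChar → Pre_generateNewSizes tupleList sizes individualChar → Spec_generateNewSizes tupleList sizes individualChar (generateNewSizes tupleList sizes individualChar)

-- ===== LEMMAS AND PROOFS =====

-- max of a descending list is its head
theorem pv_foldl_max_of_le (t : List Int) : ∀ (x : Int), (∀ y ∈ t, y ≤ x) → t.foldl max x = x := by
  induction t with
  | nil => intro x _; rfl
  | cons a t ih =>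
    intro x h
    have ha : a ≤ x := h a (by simp)
    simp only [List.foldl_cons, max_eq_left ha]
    exact ih x (fun y hy => h y (by simp [hy]))

-- A's createRangeList fold and B's gap-detector fold coincide on a descending stream
theorem pv_fold_eq (spread : Int) (hs : 0 ≤ spread) :
    ∀ (rest newSet : List Int) (cur : Int), cur ∈ newSet → (∀ x ∈ newSet, cur ≤ x) →
    List.Pairwise (fun a b => b ≤ a) (cur :: rest) →
    rest.foldl (fun (st : List Int × Int) num =>
        if st.2 - spread ≤ num ∧ num < st.2 then st
        else ((if num ∈ st.1 then st.1 else st.1 ++ [num]), num)) (newSet, cur)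
    = rest.foldl (fun (st : List Int × Int) c =>
        if c < st.2 - spread then (st.1 ++ [c], c) else st) (newSet, cur) := by
  intro rest
  induction rest with
  | nil => intro newSet cur _ _ _; rfl
  | cons c rest ih =>
    intro newSet cur hmem hge hpw
    have hc : c ≤ cur := (List.pairwise_cons.mp hpw).1 c (by simp)
    have hpwtail : List.Pairwise (fun a b => b ≤ a) (c :: rest) := (List.pairwise_cons.mp hpw).2
    have hpwcur : List.Pairwise (fun a b => b ≤ a) (cur :: rest) :=
      hpw.sublist (by
        refine List.cons_sublist_cons.mpr ?_
        exact List.sublist_cons_self c rest)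
    simp only [List.foldl_cons]
    by_cases h1 : cur - spread ≤ c ∧ c < cur
    · have h2 : ¬ c < cur - spread := by omega
      simp only [if_pos h1, if_neg h2]
      exact ih newSet cur hmem hge hpwcur
    · by_cases hlt : c < cur
      · -- then c < cur - spread
        have h2 : c < cur - spread := by omega
        have hnm : c ∉ newSet := fun hin => absurd (hge c hin) (by omega)
        simp only [if_neg h1, if_pos h2, if_neg hnm]
        refine ih (newSet ++ [c]) c (by simp) ?_ hpwtail
        intro x hx
        rcases List.mem_append.mp hx with hx | hx
        · have := hge x hx; omega
        · simp at hx; omega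
      · -- c = cur
        have hceq : c = cur := le_antisymm hc (by omega)
        have h2 : ¬ c < cur - spread := by omega
        subst hceq
        simp only [if_neg h1, if_pos hmem, if_neg h2]
        exact ih newSet c hmem hge hpwcur

-- the anchors produced by B's fold are spread-separated, with unchanged head
theorem pv_anchors_inv (spread : Int) :
    ∀ (rest anchors : List Int) (cur : Int), anchors ≠ [] → (∀ x ∈ anchors, cur ≤ x) →
    List.Pairwise (fun a b => b < a - spread) anchors →
    List.Pairwise (fun a b => b ≤ a) (cur :: rest) →
    ((rest.foldl (fun (st : List Int × Int) c =>
        if c < st.2 - spread then (st.1 ++ [c], c) else st) (anchors, cur)).1.head? = anchors.head?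
      ∧ List.Pairwise (fun a b => b < a - spread)
        (rest.foldl (fun (st : List Int × Int) c =>
          if c < st.2 - spread then (st.1 ++ [c], c) else st) (anchors, cur)).1) := by
  intro rest
  induction rest with
  | nil => intro anchors cur _ _ hpw _; exact ⟨rfl, hpw⟩
  | cons c rest ih =>
    intro anchors cur hne hge hpw hrest
    have hc : c ≤ cur := (List.pairwise_cons.mp hrest).1 c (by simp)
    have hrtail : List.Pairwise (fun a b => b ≤ a) (c :: rest) := (List.pairwise_cons.mp hrest).2
    have hrcur : List.Pairwise (fun a b => b ≤ a) (cur :: rest) :=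
      hrest.sublist (List.cons_sublist_cons.mpr (List.sublist_cons_self c rest))
    simp only [List.foldl_cons]
    by_cases h : c < cur - spread
    · simp only [if_pos h]
      have hge' : ∀ x ∈ anchors ++ [c], c ≤ x := by
        intro x hx
        rcases List.mem_append.mp hx with hx | hx
        · have h2 := hge x hx; omega
        · simp only [List.mem_singleton] at hx; omega
      have hpw' : List.Pairwise (fun a b => b < a - spread) (anchors ++ [c]) := by
        refine List.pairwise_append.mpr ⟨hpw, by simp, ?_⟩
        intro x hx y hy
        simp only [List.mem_singleton] at hy; subst hy
        have h2 := hge x hx; omega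
      have hres := ih (anchors ++ [c]) c (by simp) hge' hpw' hrtail
      refine ⟨?_, hres.2⟩
      rw [hres.1]
      cases anchors with
      | nil => exact absurd rfl hne
      | cons a t => simp
    · simp only [if_neg h]
      exact ih anchors cur hne hge hpw hrcur

-- first matching interval of a strictly decreasing table = rank by boundaries above c
theorem pv_scan_eq_count (c : Int) :
    ∀ (r : List Int), List.Pairwise (fun a b => b < a) r → (∀ x ∈ r.head?, c ≤ x) →
    pvScanBuckets r c =
      (if ((r.tail.filter (fun a => decide (c < a))).length : Int) ≤ (r.length : Int) - 2
       then some (r.tail.filter (fun a => decide (c < a))).length else none) := by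
  intro r
  induction r with
  | nil => intro _ _; simp [pvScanBuckets]
  | cons a r ih =>
    intro hpw hhead
    have hca : c ≤ a := hhead a rfl
    cases r with
    | nil =>
      simp only [pvScanBuckets, List.tail_cons, List.filter_nil, List.length_nil, List.length_cons,
        List.length_nil]
      norm_num
    | cons b rs =>
      have hba : b < a := (List.pairwise_cons.mp hpw).1 b (by simp)
      have hpw' : List.Pairwise (fun a b => b < a) (b :: rs) := (List.pairwise_cons.mp hpw).2
      by_cases hb : b ≤ c
      · have hfilt : (b :: rs).filter (fun a => decide (c < a)) = [] := by
          rw [List.filter_eq_nil_iff]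
          intro x hx
          rcases List.mem_cons.mp hx with hx | hx
          · subst hx; simp; omega
          · have hxb : x < b := (List.pairwise_cons.mp hpw').1 x hx
            simp; omega
        simp only [pvScanBuckets, if_pos (And.intro hb hca), List.tail_cons, hfilt,
          List.length_nil, List.length_cons]
        simp
      · have hcb : c < b := by omega
        have hres := ih hpw' (by intro x hx; simp at hx; omega)
        simp only [pvScanBuckets, if_neg (by omega : ¬ (b ≤ c ∧ c ≤ a)), hres, List.tail_cons]
        have hcons : (b :: rs).filter (fun a => decide (c < a))
            = b :: rs.filter (fun a => decide (c < a)) := by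
          rw [List.filter_cons_of_pos]; simp; omega
        rw [hcons]
        by_cases hcond : ((rs.filter (fun a => decide (c < a))).length : Int) ≤ ((b :: rs).length : Int) - 2
        · rw [if_pos hcond, if_pos (by simp at hcond ⊢; omega)]
          simp [Option.map]
        · rw [if_neg hcond, if_neg (by simp at hcond ⊢; omega)]
          rfl

-- ===== proof-only helpers =====
def pvPick (r sizes : List Int) (c : Int) : Int :=
  match pvScanBuckets r c with
  | some index => PySem.List.pyGetD sizes (index : Int) 0
  | none => PySem.List.pyGetD sizes ((sizes.length : Int) - 1) 0

-- the two ports after sorting, parametrised by the spread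
def pvAafter (tl : List (String × Int)) (sizes : List Int) (spread : Int) : List (Int × Int) :=
  let countList := tl.map (fun i => i.2)
  let rangeList := pvCreateRangeList countList spread
  let rangeList := if (rangeList.length : Int) > (sizes.length : Int)
      then PySem.List.slice rangeList (some 0) (some ((sizes.length : Int) - 1)) else rangeList
  let newSizeList := countList.foldl
    (fun acc count =>
      let added := pvScanBuckets rangeList count
      let acc := match added with
        | some index => acc ++ [PySem.List.pyGetD sizes (index : Int) 0]
        | none => acc
      if rangeList.length = 1 then acc ++ [PySem.List.pyGetD sizes 1 0]
      else match added with
        | some _ => acc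
        | none => acc ++ [PySem.List.pyGetD sizes ((sizes.length : Int) - 1) 0]) []
  (List.range newSizeList.length).foldl
    (fun acc (count : Nat) =>
      acc ++ [((PySem.List.pyGetD tl (count : Int) ("", 0)).2, PySem.List.pyGetD newSizeList (count : Int) 0)]) []

def pvBafter (tl : List (String × Int)) (sizes : List Int) (spread : Int) : List (Int × Int) :=
  let counts := tl.map (fun t => t.2)
  let c0 := PySem.List.pyGetD counts 0 0
  let anchors := ((PySem.List.slice counts (some 1) none).foldl
      (fun (st : List Int × Int) c => if c < st.2 - spread then (st.1 ++ [c], c) else st) ([c0], c0)).1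
  let anchors := if (anchors.length : Int) > (sizes.length : Int)
      then PySem.List.slice anchors (some 0) (some ((sizes.length : Int) - 1)) else anchors
  if anchors.length = 1 then counts.map (fun c => (c, PySem.List.pyGetD sizes 1 0))
  else
    let tail := PySem.List.slice anchors (some 1) none
    let last : Int := (anchors.length : Int) - 2
    counts.map (fun c =>
      let k := (tail.filter (fun a => decide (c < a))).length
      (c, if (k : Int) ≤ last then PySem.List.pyGetD sizes (k : Int) 0
          else PySem.List.pyGetD sizes ((sizes.length : Int) - 1) 0))

theorem pv_range_eq (spread : Int) (hs : 0 ≤ spread) (c0 : Int) (rest : List Int)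
    (hpw : List.Pairwise (fun a b => b ≤ a) (c0 :: rest)) :
    pvCreateRangeList (c0 :: rest) spread
      = ((rest.foldl (fun (st : List Int × Int) c =>
          if c < st.2 - spread then (st.1 ++ [c], c) else st) ([c0], c0)).1) := by
  have hmax : (PySem.List.max? (c0 :: rest) (fun x => x)) = some c0 := by
    rw [PySem.List.max?_id_cons]
    rw [pv_foldl_max_of_le rest c0 (fun y hy => (List.pairwise_cons.mp hpw).1 y hy)]
  unfold pvCreateRangeList
  rw [hmax]
  simp only [Option.getD_some, List.foldl_cons]
  rw [if_neg (by omega : ¬ (c0 - spread ≤ c0 ∧ c0 < c0))]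
  rw [if_neg (List.not_mem_nil)]
  simp only [List.nil_append]
  exact congrArg Prod.fst (pv_fold_eq spread hs rest [c0] c0 (by simp) (by simp) hpw)

theorem pv_nsl_eq (r sizes counts : List Int) (hr : r.length ≠ 1) :
    counts.foldl
      (fun acc count =>
        let added := pvScanBuckets r count
        let acc := match added with
          | some index => acc ++ [PySem.List.pyGetD sizes (index : Int) 0]
          | none => acc
        if r.length = 1 then acc ++ [PySem.List.pyGetD sizes 1 0]
        else match added with
          | some _ => acc
          | none => acc ++ [PySem.List.pyGetD sizes ((sizes.length : Int) - 1) 0]) []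
    = counts.map (pvPick r sizes) := by
  have hbody : (fun (acc : List Int) (count : Int) =>
      let added := pvScanBuckets r count
      let acc := match added with
        | some index => acc ++ [PySem.List.pyGetD sizes (index : Int) 0]
        | none => acc
      if r.length = 1 then acc ++ [PySem.List.pyGetD sizes 1 0]
      else match added with
        | some _ => acc
        | none => acc ++ [PySem.List.pyGetD sizes ((sizes.length : Int) - 1) 0])
      = fun acc count => acc ++ [pvPick r sizes count] := by
    funext acc count
    simp only [if_neg hr, pvPick]
    cases pvScanBuckets r count <;> rfl
  rw [hbody, PySem.List.foldl_append_singleton_eq_map]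
  simp

theorem pv_nsl_one (r sizes counts : List Int) (hr : r.length = 1) :
    counts.foldl
      (fun acc count =>
        let added := pvScanBuckets r count
        let acc := match added with
          | some index => acc ++ [PySem.List.pyGetD sizes (index : Int) 0]
          | none => acc
        if r.length = 1 then acc ++ [PySem.List.pyGetD sizes 1 0]
        else match added with
          | some _ => acc
          | none => acc ++ [PySem.List.pyGetD sizes ((sizes.length : Int) - 1) 0]) []
    = counts.map (fun _ => PySem.List.pyGetD sizes 1 0) := by
  obtain ⟨x, hx⟩ := List.length_eq_one_iff.mp hr
  subst hx
  have hbody : (fun (acc : List Int) (count : Int) =>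
      let added := pvScanBuckets [x] count
      let acc := match added with
        | some index => acc ++ [PySem.List.pyGetD sizes (index : Int) 0]
        | none => acc
      if ([x] : List Int).length = 1 then acc ++ [PySem.List.pyGetD sizes 1 0]
      else match added with
        | some _ => acc
        | none => acc ++ [PySem.List.pyGetD sizes ((sizes.length : Int) - 1) 0])
      = fun acc _ => acc ++ [PySem.List.pyGetD sizes 1 0] := by
    funext acc count
    simp [pvScanBuckets]
  rw [hbody, PySem.List.foldl_append_singleton_eq_map]
  simp

theorem pv_final (tl : List (String × Int)) (f : Int → Int) :
    (List.range ((tl.map (fun i => i.2)).map f).length).foldl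
      (fun acc (count : Nat) =>
        acc ++ [((PySem.List.pyGetD tl (count : Int) ("", 0)).2,
                 PySem.List.pyGetD ((tl.map (fun i => i.2)).map f) (count : Int) 0)]) []
    = (tl.map (fun i => i.2)).map (fun c => (c, f c)) := by
  rw [PySem.List.foldl_append_singleton_eq_map]
  simp only [List.nil_append]
  apply List.ext_getElem
  · simp
  · intro i h1 h2
    have hi : i < tl.length := by simpa using h2
    rw [List.getElem_map, List.getElem_range, List.getElem_map]
    rw [PySem.List.pyGetD_natCast, PySem.List.pyGetD_natCast,
        List.getD_eq_getElem tl ("", 0) hi,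
        List.getD_eq_getElem ((tl.map (fun i => i.2)).map f) 0 (by simpa using hi)]
    simp

theorem pv_core (tl : List (String × Int)) (sizes : List Int) (spread : Int)
    (hs : 0 ≤ spread) (hne : tl ≠ []) (hsz : sizes ≠ [])
    (hpw : List.Pairwise (fun a b => b.2 ≤ a.2) tl) :
    pvAafter tl sizes spread = pvBafter tl sizes spread := by
  have hcne : tl.map (fun i => i.2) ≠ [] := by simpa using hne
  obtain ⟨c0, rest, hcr⟩ := List.exists_cons_of_ne_nil hcne
  have hpwc : List.Pairwise (fun a b => b ≤ a) (tl.map (fun i => i.2)) := by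
    rw [List.pairwise_map]; exact hpw
  have hpwc' : List.Pairwise (fun a b => b ≤ a) (c0 :: rest) := hcr ▸ hpwc
  have hszlen : 1 ≤ sizes.length := List.length_pos_iff.mpr hsz
  have hg0 : PySem.List.pyGetD (tl.map (fun t => t.2)) 0 0 = c0 := by
    rw [hcr, PySem.List.pyGetD_zero_cons]
  have htail : PySem.List.slice (tl.map (fun t => t.2)) (some 1) none = rest := by
    rw [PySem.List.slice_from_one, hcr, List.tail_cons]
  have hr0 : pvCreateRangeList (tl.map (fun i => i.2)) spread
      = ((rest.foldl (fun (st : List Int × Int) c =>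
          if c < st.2 - spread then (st.1 ++ [c], c) else st) ([c0], c0)).1) := by
    rw [hcr]; exact pv_range_eq spread hs c0 rest hpwc'
  have hinv := pv_anchors_inv spread rest [c0] c0 (by simp) (by simp) (by simp) hpwc'
  simp only [pvAafter, pvBafter]
  rw [hg0, htail, hr0]
  have hhead0 : ((rest.foldl (fun (st : List Int × Int) c =>
      if c < st.2 - spread then (st.1 ++ [c], c) else st) ([c0], c0)).1).head? = some c0 := by
    rw [hinv.1]; rfl
  have hgap := hinv.2
  generalize ha0 : ((rest.foldl (fun (st : List Int × Int) c =>
      if c < st.2 - spread then (st.1 ++ [c], c) else st) ([c0], c0)).1) = a0 at hhead0 hgap ⊢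
  set T := if ((a0.length : Int) > (sizes.length : Int))
      then PySem.List.slice a0 (some 0) (some ((sizes.length : Int) - 1)) else a0 with hT
  have hpre : T <+: a0 := by
    rw [hT]
    split_ifs with htr
    · have hcast : ((sizes.length : Int) - 1) = ((sizes.length - 1 : Nat) : Int) := by
        omega
      rw [hcast, PySem.List.slice_zero_start, PySem.List.slice_to_natCast]
      exact List.take_prefix _ _
    · exact List.prefix_rfl
  have hpwr : List.Pairwise (fun a b => b < a) T := by
    refine (List.Pairwise.sublist hpre.sublist hgap).imp ?_
    intro a b hab; omega
  have hheadT : ∀ x ∈ T.head?, x = c0 := by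
    intro x hx
    obtain ⟨t, ht⟩ := hpre
    cases hTc : T with
    | nil => rw [hTc] at hx; simp at hx
    | cons y T' =>
      rw [hTc] at hx
      simp only [List.head?_cons, Option.mem_def, Option.some.injEq] at hx
      subst hx
      rw [← ht, hTc] at hhead0
      simpa using hhead0
  have hle : ∀ c ∈ tl.map (fun i => i.2), c ≤ c0 := by
    intro c hc
    rw [hcr] at hc
    rcases List.mem_cons.mp hc with hc | hc
    · omega
    · exact (List.pairwise_cons.mp hpwc').1 c hc
  by_cases h1 : T.length = 1
  · rw [if_pos h1, pv_nsl_one T sizes (tl.map (fun i => i.2)) h1]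
    exact pv_final tl (fun _ => PySem.List.pyGetD sizes 1 0)
  · rw [if_neg h1, pv_nsl_eq T sizes (tl.map (fun i => i.2)) h1,
        pv_final tl (pvPick T sizes)]
    rw [PySem.List.slice_from_one]
    refine List.map_congr_left ?_
    intro c hc
    have hheadc : ∀ x ∈ T.head?, c ≤ x := by
      intro x hx
      rw [hheadT x hx]
      exact hle c hc
    simp only [Prod.mk.injEq, true_and]
    unfold pvPick
    rw [pv_scan_eq_count c T hpwr hheadc]
    split_ifs with hcond
    · rfl
    · rfl

-- ===== VERDICT (by name: the statement is the Claim_ definition above) =====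
theorem generateNewSizes_spec : Claim_equal_generateNewSizes := by
  intro tupleList sizes individualChar _ hpre
  obtain ⟨hne, hsz, -⟩ := hpre
  unfold Spec_generateNewSizes
  have hne' : PySem.List.sorted tupleList (fun x => x.2) true ≠ [] := by
    simpa [PySem.List.sorted_eq_nil_iff] using hne
  have hpw := PySem.List.sorted_pairwise_rev tupleList (fun x => x.2)
  cases individualChar
  · exact pv_core (PySem.List.sorted tupleList (fun x => x.2) true) sizes 6 (by omega) hne' hsz hpw
  · exact pv_core (PySem.List.sorted tupleList (fun x => x.2) true) sizes 0 (by omega) hne' hsz hpw
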